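-- pv_equiv track=rewrite | github.com/Marcusng88/bos_solution | backend/app/services/content_planning/utils/data_preprocessor.py | generate_content_variations_by_length
-- ===== SOURCE A (Python) =====
-- from typing import Dict, List, Any, Optional
--
-- def generate_content_variations_by_length(
--     base_content: str,
--     target_lengths: List[int]
-- ) -> List[str]:
--     """Generate content variations for different platforms based on length"""
--     variations = []
--
--     for target_length in target_lengths:
--         if len(base_content) <= target_length:
--             variations.append(base_content)
--         else:
--             # Truncate intelligently
--             sentences = base_content.split('.')
--             truncated = ""
--
--             for sentence in sentences:
--                 if len(truncated + sentence + ".") <= target_length - 10:  # Leave space for "..."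
--                     truncated += sentence + "."
--                 else:
--                     break
--
--             if truncated:
--                 variations.append(truncated.strip())
--             else:
--                 # If even first sentence is too long, truncate it
--                 variations.append(base_content[:target_length-3] + "...")
--
--     return variations
-- ===== SOURCE B (Python) =====
-- def generate_content_variations_by_length(base_content, target_lengths):
--     n = len(base_content)
--     pieces = [s + "." for s in base_content.split('.')]
--     cum = [0]
--     for p in pieces:
--         cum.append(cum[-1] + len(p))
--     variations = []
--     for t in target_lengths:
--         if n <= t:
--             variations.append(base_content)
--         elif cum[1] <= t - 10:
--             lo, hi = 1, len(cum) - 1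
--             while lo < hi:
--                 mid = (lo + hi + 1) // 2
--                 if cum[mid] <= t - 10:
--                     lo = mid
--                 else:
--                     hi = mid - 1
--             variations.append("".join(pieces[:lo]).strip())
--         else:
--             variations.append(base_content[:t - 3] + "...")
--     return variations
-- ===== Notes on version B (the rewrite author's own statement) =====
-- stated objective: alternative
-- what changed: B splits the content into sentences once, precomputes a prefix-sum table of sentence lengths, and finds the largest fitting sentence prefix for each target length by binary search and a single join, instead of A's per-target greedy loop that repeatedly rebuilds and re-measures the growing truncated string.
import Mathlib
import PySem

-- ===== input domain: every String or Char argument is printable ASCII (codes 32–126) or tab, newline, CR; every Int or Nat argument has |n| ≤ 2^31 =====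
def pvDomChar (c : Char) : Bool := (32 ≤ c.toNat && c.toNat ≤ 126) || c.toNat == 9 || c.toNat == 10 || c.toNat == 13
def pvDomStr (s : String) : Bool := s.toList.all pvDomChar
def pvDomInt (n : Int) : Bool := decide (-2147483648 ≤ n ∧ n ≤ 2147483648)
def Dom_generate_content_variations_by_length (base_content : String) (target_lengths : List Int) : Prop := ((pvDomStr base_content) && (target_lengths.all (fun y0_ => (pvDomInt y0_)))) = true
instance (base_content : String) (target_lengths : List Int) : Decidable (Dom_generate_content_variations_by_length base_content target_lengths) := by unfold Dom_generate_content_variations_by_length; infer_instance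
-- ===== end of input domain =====

-- B replaces A's per-target greedy string-concatenation scan with one precomputed
-- sentence-length prefix-sum table and a binary search per target (objective: alternative).

-- ===== PORT A =====
-- A's inner 'for sentence in sentences: … break' loop
def pvTruncLoopA (t : Int) : List (List Char) → List Char → List Char
  | [], truncated => truncated
  | s :: rest, truncated =>
    if ((truncated ++ s ++ ['.']).length : Int) ≤ t - 10 then
      pvTruncLoopA t rest (truncated ++ s ++ ['.'])
    else truncated

def generate_content_variations_by_length (base_content : String) (target_lengths : List Int) : List String :=
  target_lengths.foldl (fun variations target_length =>
    if PySem.Str.len base_content ≤ target_length then variations ++ [base_content]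
    else
      let sentences := PySem.Chars.splitOn base_content.toList ['.']
      let truncated := pvTruncLoopA target_length sentences []
      if truncated ≠ [] then
        variations ++ [String.ofList (PySem.Chars.strip truncated)]
      else
        variations ++ [String.ofList (PySem.List.slice base_content.toList none (some (target_length - 3)) ++ ['.', '.', '.'])]
    ) []

-- ===== PORT B =====
-- B's 'while lo < hi' binary search for the largest k with cum[k] <= x
def pvBisect (cum : List Int) (x : Int) (lo hi : Int) : Int :=
  if h : lo < hi then
    let mid := PySem.Int.floordiv (lo + hi + 1) 2
    if PySem.List.pyGetD cum mid 0 ≤ x then pvBisect cum x mid hi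
    else pvBisect cum x lo (mid - 1)
  else lo
termination_by (hi - lo).toNat
decreasing_by
  · have hb := PySem.Int.floordiv_two_mid_bounds (lo := lo + 1) (hi := hi) (by omega)
    have heq : lo + 1 + hi = lo + hi + 1 := by ring
    rw [heq] at hb
    omega
  · have hb := PySem.Int.floordiv_two_mid_bounds (lo := lo + 1) (hi := hi) (by omega)
    have heq : lo + 1 + hi = lo + hi + 1 := by ring
    rw [heq] at hb
    omega

def generate_content_variations_by_length_alt (base_content : String) (target_lengths : List Int) : List String :=
  let n := PySem.Str.len base_content
  let pieces := (PySem.Chars.splitOn base_content.toList ['.']).map (fun s => s ++ ['.'])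
  let cum := pieces.foldl (fun c p => c ++ [PySem.List.pyGetD c (-1) 0 + (p.length : Int)]) [(0 : Int)]
  target_lengths.foldl (fun variations t =>
    if n ≤ t then variations ++ [base_content]
    else if PySem.List.pyGetD cum 1 0 ≤ t - 10 then
      let lo := pvBisect cum (t - 10) 1 ((cum.length : Int) - 1)
      variations ++ [String.ofList (PySem.Chars.strip (PySem.Chars.join [] (PySem.List.slice pieces none (some lo))))]
    else
      variations ++ [String.ofList (PySem.List.slice base_content.toList none (some (t - 3)) ++ ['.', '.', '.'])]
    ) []

-- ===== PRECONDITION & SPEC =====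
def Spec_generate_content_variations_by_length (base_content : String) (target_lengths : List Int) (out : List String) : Prop := out = generate_content_variations_by_length_alt base_content target_lengths
instance (base_content : String) (target_lengths : List Int) (out : List String) : Decidable (Spec_generate_content_variations_by_length base_content target_lengths out) := by unfold Spec_generate_content_variations_by_length; infer_instance

-- ===== CLAIM (what is proved, stated in full; the proofs are below) =====
def Claim_equal_generate_content_variations_by_length : Prop := ∀ (base_content : String) (target_lengths : List Int), Dom_generate_content_variations_by_length base_content target_lengths → Spec_generate_content_variations_by_length base_content target_lengths (generate_content_variations_by_length base_content target_lengths)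

-- ===== LEMMAS AND PROOFS =====

-- prefix sums of piece lengths
def pvS (ps : List (List Char)) (k : Nat) : Int := ((ps.take k).map (fun p => (p.length : Int))).sum

lemma pvS_cons (p : List Char) (ps : List (List Char)) (k : Nat) :
    pvS (p :: ps) (k + 1) = (p.length : Int) + pvS ps k := by simp [pvS]

lemma pvS_nonneg (ps : List (List Char)) (k : Nat) : 0 ≤ pvS ps k := by
  unfold pvS
  apply List.sum_nonneg
  intro x hx
  obtain ⟨p, _, rfl⟩ := List.mem_map.1 hx
  positivity

lemma pvS_mono : ∀ (ps : List (List Char)) {i j : Nat}, i ≤ j → pvS ps i ≤ pvS ps j := by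
  intro ps
  induction ps with
  | nil => intro i j _; simp [pvS]
  | cons p ps ih =>
    intro i j hij
    cases i with
    | zero => simpa [pvS] using pvS_nonneg (p :: ps) j
    | succ i =>
      cases j with
      | zero => omega
      | succ j =>
        rw [pvS_cons, pvS_cons]
        have := ih (i := i) (j := j) (by omega); omega

lemma splitOn_go_ne_nil (sep : List Char) : ∀ (fuel : Nat) (l cur : List Char) (acc : List (List Char)),
    PySem.Chars.splitOn.go sep fuel l cur acc ≠ [] := by
  intro fuel
  induction fuel with
  | zero => intro l cur acc; simp [PySem.Chars.splitOn.go]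
  | succ n ih =>
    intro l cur acc
    cases l with
    | nil => simp [PySem.Chars.splitOn.go]
    | cons c rest =>
      rw [PySem.Chars.splitOn.go]
      split <;> apply ih

lemma splitOn_ne_nil (s sep : List Char) : PySem.Chars.splitOn s sep ≠ [] := by
  unfold PySem.Chars.splitOn
  apply splitOn_go_ne_nil

lemma cum_build_aux :
    ∀ (ps : List (List Char)) (init : List Int) (v : Int),
    ps.foldl (fun c p => c ++ [PySem.List.pyGetD c (-1) 0 + (p.length : Int)]) (init ++ [v])
      = init ++ [v] ++ (List.range ps.length).map (fun k => v + pvS ps (k + 1)) := by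
  intro ps
  induction ps with
  | nil => intro init v; simp
  | cons p rest ih =>
    intro init v
    simp only [List.foldl_cons, PySem.List.pyGetD_neg_one_append_singleton]
    have h1 : init ++ [v] ++ [v + (p.length : Int)] = (init ++ [v]) ++ [v + (p.length : Int)] := by simp
    rw [h1, ih]
    simp only [List.length_cons, List.range_succ_eq_map, List.map_cons, List.map_map]
    have h2 : ∀ k : Nat, pvS (p :: rest) (k + 1) = (p.length : Int) + pvS rest k := fun k => pvS_cons p rest k
    simp only [h2, Function.comp_def, Nat.succ_eq_add_one]
    simp [List.append_assoc, add_assoc, pvS]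

-- the cum-building foldl computes the prefix sums
lemma cum_build (ps : List (List Char)) :
    ps.foldl (fun c p => c ++ [PySem.List.pyGetD c (-1) 0 + (p.length : Int)]) [(0 : Int)]
      = (List.range (ps.length + 1)).map (fun k => pvS ps k) := by
  have h := cum_build_aux ps [] 0
  simp only [List.nil_append] at h
  rw [h, List.range_succ_eq_map]
  simp [pvS, Nat.succ_eq_add_one]

lemma cum_get (ps : List (List Char)) {m : Int} (h0 : 0 ≤ m) (hm : m ≤ (ps.length : Int)) :
    PySem.List.pyGetD ((List.range (ps.length + 1)).map (fun k => pvS ps k)) m 0 = pvS ps m.toNat := by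
  rw [PySem.List.pyGetD_of_nonneg _ _ h0]
  exact PySem.List.getD_map_range _ _ _ _ (by omega)

-- the binary search returns an index r with pvS r ≤ x and (r = N or x < pvS (r+1))
lemma pvBisect_spec (ps : List (List Char)) (x : Int) :
    ∀ (fuel : Nat) (lo hi : Int), (hi - lo).toNat ≤ fuel →
    1 ≤ lo → lo ≤ hi → hi ≤ (ps.length : Int) →
    pvS ps lo.toNat ≤ x → (hi = (ps.length : Int) ∨ x < pvS ps (hi.toNat + 1)) →
    ∃ r : Nat, pvBisect ((List.range (ps.length + 1)).map (fun k => pvS ps k)) x lo hi = (r : Int) ∧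
      1 ≤ r ∧ (r : Int) ≤ (ps.length : Int) ∧ pvS ps r ≤ x ∧
      ((r : Int) = (ps.length : Int) ∨ x < pvS ps (r + 1)) := by
  intro fuel
  induction fuel with
  | zero =>
    intro lo hi hfuel h1 hlh hhn hlo hhi
    have hle : hi ≤ lo := by omega
    refine ⟨lo.toNat, ?_, by omega, by omega, hlo, ?_⟩
    · rw [pvBisect]; simp [not_lt.2 hle]; omega
    · rcases hhi with h | h
      · left; omega
      · right; have heq : hi.toNat = lo.toNat := by omega
        rwa [heq] at h
  | succ n ih =>
    intro lo hi hfuel h1 hlh hhn hlo hhi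
    by_cases hlt : lo < hi
    · have hb := PySem.Int.floordiv_two_mid_bounds (lo := lo + 1) (hi := hi) (by omega)
      have he : lo + 1 + hi = lo + hi + 1 := by ring
      rw [he] at hb
      set mid := PySem.Int.floordiv (lo + hi + 1) 2 with hmid
      have hget : PySem.List.pyGetD ((List.range (ps.length + 1)).map (fun k => pvS ps k)) x.succ 0 = 0 → True := fun _ => trivial
      have hget' : PySem.List.pyGetD ((List.range (ps.length + 1)).map (fun k => pvS ps k)) mid 0 = pvS ps mid.toNat :=
        cum_get ps (by omega) (by omega)
      rw [pvBisect]
      simp only [hlt, dif_pos, ← hmid, hget']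
      by_cases hc : pvS ps mid.toNat ≤ x
      · simp only [hc, if_pos]
        exact ih mid hi (by omega) (by omega) (by omega) hhn hc hhi
      · simp only [hc, if_false]
        refine ih lo (mid - 1) (by omega) h1 (by omega) (by omega) hlo ?_
        right
        have heq : (mid - 1).toNat + 1 = mid.toNat := by omega
        rw [heq]; omega
    · refine ⟨lo.toNat, ?_, by omega, by omega, hlo, ?_⟩
      · rw [pvBisect]; simp [hlt]; omega
      · rcases hhi with h | h
        · left; omega
        · right; have heq : hi.toNat = lo.toNat := by omega
          rwa [heq] at h

-- A's greedy loop stops exactly at an index k with the bracket property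
lemma truncA_spec (t : Int) :
    ∀ (ss : List (List Char)) (acc : List Char) (k : Nat),
    k ≤ ss.length →
    (∀ j : Nat, j < k → (acc.length : Int) + pvS (ss.map (fun s => s ++ ['.'])) (j + 1) ≤ t - 10) →
    (k = ss.length ∨ ¬ ((acc.length : Int) + pvS (ss.map (fun s => s ++ ['.'])) (k + 1) ≤ t - 10)) →
    pvTruncLoopA t ss acc = acc ++ ((ss.map (fun s => s ++ ['.'])).take k).flatten := by
  intro ss
  induction ss with
  | nil =>
    intro acc k hk _ _
    have hk0 : k = 0 := by simpa using hk
    subst hk0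
    simp [pvTruncLoopA]
  | cons s rest ih =>
    intro acc k hk hclosed hstop
    have hS1 : pvS ((s :: rest).map (fun s => s ++ ['.'])) 1 = (s.length : Int) + 1 := by
      simp [pvS]
    cases k with
    | zero =>
      have hbad : ¬ ((acc.length : Int) + pvS ((s :: rest).map (fun s => s ++ ['.'])) 1 ≤ t - 10) := by
        rcases hstop with h | h
        · simp at h
        · exact h
      rw [hS1] at hbad
      have hcond : ¬ (((acc ++ s ++ ['.']).length : Int) ≤ t - 10) := by
        simp only [List.length_append, List.length_cons, List.length_nil]
        push_cast
        omega
      rw [pvTruncLoopA, if_neg hcond]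
      simp
    | succ j =>
      have hacc : (acc.length : Int) + pvS ((s :: rest).map (fun s => s ++ ['.'])) 1 ≤ t - 10 :=
        hclosed 0 (by omega)
      rw [hS1] at hacc
      have hcond : ((acc ++ s ++ ['.']).length : Int) ≤ t - 10 := by
        simp only [List.length_append, List.length_cons, List.length_nil]
        push_cast
        omega
      have hshift : ∀ i : Nat, pvS ((s :: rest).map (fun s => s ++ ['.'])) (i + 1)
          = ((s ++ ['.']).length : Int) + pvS (rest.map (fun s => s ++ ['.'])) i := by
        intro i
        simpa using pvS_cons (s ++ ['.']) (rest.map (fun s => s ++ ['.'])) i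
      rw [pvTruncLoopA]
      simp only [hcond, if_pos]
      rw [ih (acc ++ s ++ ['.']) j (by simpa using hk) ?_ ?_]
      · simp [List.append_assoc]
      · intro i hi
        have hcl := hclosed (i + 1) (by omega)
        rw [hshift (i + 1)] at hcl
        simp only [List.length_append, List.length_cons, List.length_nil] at hcl ⊢
        push_cast at hcl ⊢
        omega
      · rcases hstop with h | h
        · left; simpa using h
        · right
          rw [hshift (j + 1)] at h
          simp only [List.length_append, List.length_cons, List.length_nil] at h ⊢
          push_cast at h ⊢
          omega

lemma join_nil_flatten : ∀ (xss : List (List Char)), PySem.Chars.join [] xss = xss.flatten := by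
  intro xss
  induction xss with
  | nil => simp [PySem.Chars.join_nil]
  | cons p rest ih =>
    cases rest with
    | nil => simp [PySem.Chars.join_singleton]
    | cons q r => rw [PySem.Chars.join_cons_cons]; simp_all

-- the value A appends for one target length
def pvElemA (base_content : String) (target_length : Int) : String :=
  if PySem.Str.len base_content ≤ target_length then base_content
  else if pvTruncLoopA target_length (PySem.Chars.splitOn base_content.toList ['.']) [] ≠ [] then
    String.ofList (PySem.Chars.strip (pvTruncLoopA target_length (PySem.Chars.splitOn base_content.toList ['.']) []))
  else String.ofList (PySem.List.slice base_content.toList none (some (target_length - 3)) ++ ['.', '.', '.'])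

-- the value B appends for one target length
def pvElemB (base_content : String) (t : Int) : String :=
  if PySem.Str.len base_content ≤ t then base_content
  else if PySem.List.pyGetD (((PySem.Chars.splitOn base_content.toList ['.']).map (fun s => s ++ ['.'])).foldl (fun c p => c ++ [PySem.List.pyGetD c (-1) 0 + (p.length : Int)]) [(0 : Int)]) 1 0 ≤ t - 10 then
    String.ofList (PySem.Chars.strip (PySem.Chars.join [] (PySem.List.slice ((PySem.Chars.splitOn base_content.toList ['.']).map (fun s => s ++ ['.'])) none (some (pvBisect (((PySem.Chars.splitOn base_content.toList ['.']).map (fun s => s ++ ['.'])).foldl (fun c p => c ++ [PySem.List.pyGetD c (-1) 0 + (p.length : Int)]) [(0 : Int)]) (t - 10) 1 (((((PySem.Chars.splitOn base_content.toList ['.']).map (fun s => s ++ ['.'])).foldl (fun c p => c ++ [PySem.List.pyGetD c (-1) 0 + (p.length : Int)]) [(0 : Int)]).length : Int) - 1))))))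
  else String.ofList (PySem.List.slice base_content.toList none (some (t - 3)) ++ ['.', '.', '.'])

lemma foldlA_eq_map (base_content : String) :
    ∀ (ts : List Int) (acc : List String),
    ts.foldl (fun variations target_length =>
      if PySem.Str.len base_content ≤ target_length then variations ++ [base_content]
      else
        let sentences := PySem.Chars.splitOn base_content.toList ['.']
        let truncated := pvTruncLoopA target_length sentences []
        if truncated ≠ [] then
          variations ++ [String.ofList (PySem.Chars.strip truncated)]
        else
          variations ++ [String.ofList (PySem.List.slice base_content.toList none (some (target_length - 3)) ++ ['.', '.', '.'])]
      ) acc = acc ++ ts.map (pvElemA base_content) := by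
  intro ts
  induction ts with
  | nil => intro acc; simp
  | cons t ts ih =>
    intro acc
    rw [List.foldl_cons, ih]
    have hstep : (if PySem.Str.len base_content ≤ t then acc ++ [base_content]
      else
        let sentences := PySem.Chars.splitOn base_content.toList ['.']
        let truncated := pvTruncLoopA t sentences []
        if truncated ≠ [] then
          acc ++ [String.ofList (PySem.Chars.strip truncated)]
        else
          acc ++ [String.ofList (PySem.List.slice base_content.toList none (some (t - 3)) ++ ['.', '.', '.'])])
        = acc ++ [pvElemA base_content t] := by
      unfold pvElemA
      by_cases h1 : ((base_content.length : Nat) : Int) ≤ t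
      · simp [h1]
      · by_cases h2 : pvTruncLoopA t (PySem.Chars.splitOn base_content.toList ['.']) [] = []
        · simp [h1, h2]
        · simp [h1, h2]
    rw [hstep]
    simp

lemma foldlB_eq_map (base_content : String) :
    ∀ (ts : List Int) (acc : List String),
    ts.foldl (fun variations t =>
      if PySem.Str.len base_content ≤ t then variations ++ [base_content]
      else if PySem.List.pyGetD (((PySem.Chars.splitOn base_content.toList ['.']).map (fun s => s ++ ['.'])).foldl (fun c p => c ++ [PySem.List.pyGetD c (-1) 0 + (p.length : Int)]) [(0 : Int)]) 1 0 ≤ t - 10 then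
        variations ++ [String.ofList (PySem.Chars.strip (PySem.Chars.join [] (PySem.List.slice ((PySem.Chars.splitOn base_content.toList ['.']).map (fun s => s ++ ['.'])) none (some (pvBisect (((PySem.Chars.splitOn base_content.toList ['.']).map (fun s => s ++ ['.'])).foldl (fun c p => c ++ [PySem.List.pyGetD c (-1) 0 + (p.length : Int)]) [(0 : Int)]) (t - 10) 1 (((((PySem.Chars.splitOn base_content.toList ['.']).map (fun s => s ++ ['.'])).foldl (fun c p => c ++ [PySem.List.pyGetD c (-1) 0 + (p.length : Int)]) [(0 : Int)]).length : Int) - 1))))))]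
      else
        variations ++ [String.ofList (PySem.List.slice base_content.toList none (some (t - 3)) ++ ['.', '.', '.'])]
      ) acc = acc ++ ts.map (pvElemB base_content) := by
  intro ts
  induction ts with
  | nil => intro acc; simp
  | cons t ts ih =>
    intro acc
    rw [List.foldl_cons, ih]
    have hstep : (if PySem.Str.len base_content ≤ t then acc ++ [base_content]
      else if PySem.List.pyGetD (((PySem.Chars.splitOn base_content.toList ['.']).map (fun s => s ++ ['.'])).foldl (fun c p => c ++ [PySem.List.pyGetD c (-1) 0 + (p.length : Int)]) [(0 : Int)]) 1 0 ≤ t - 10 then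
        acc ++ [String.ofList (PySem.Chars.strip (PySem.Chars.join [] (PySem.List.slice ((PySem.Chars.splitOn base_content.toList ['.']).map (fun s => s ++ ['.'])) none (some (pvBisect (((PySem.Chars.splitOn base_content.toList ['.']).map (fun s => s ++ ['.'])).foldl (fun c p => c ++ [PySem.List.pyGetD c (-1) 0 + (p.length : Int)]) [(0 : Int)]) (t - 10) 1 (((((PySem.Chars.splitOn base_content.toList ['.']).map (fun s => s ++ ['.'])).foldl (fun c p => c ++ [PySem.List.pyGetD c (-1) 0 + (p.length : Int)]) [(0 : Int)]).length : Int) - 1))))))]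
      else
        acc ++ [String.ofList (PySem.List.slice base_content.toList none (some (t - 3)) ++ ['.', '.', '.'])])
        = acc ++ [pvElemB base_content t] := by
      unfold pvElemB
      by_cases h1 : ((base_content.length : Nat) : Int) ≤ t
      · simp [h1]
      · by_cases h2 : PySem.List.pyGetD (((PySem.Chars.splitOn base_content.toList ['.']).map (fun s => s ++ ['.'])).foldl (fun c p => c ++ [PySem.List.pyGetD c (-1) 0 + (p.length : Int)]) [(0 : Int)]) 1 0 ≤ t - 10
        · simp [h1, h2]
        · simp [h1, h2]
    rw [hstep]
    simp

-- one target length: A's element equals B's element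
lemma elem_eq (base_content : String) (t : Int) :
    pvElemA base_content t = pvElemB base_content t := by
  have hne := splitOn_ne_nil base_content.toList ['.']
  unfold pvElemA pvElemB
  by_cases hn : PySem.Str.len base_content ≤ t
  · rw [if_pos hn, if_pos hn]
  · rw [if_neg hn, if_neg hn]
    generalize hssdef : PySem.Chars.splitOn base_content.toList ['.'] = ss
    rw [hssdef] at hne
    have hss1 : 1 ≤ ss.length := by
      cases ss with
      | nil => exact absurd rfl hne
      | cons a l => simp
    have hN : (ss.map (fun s => s ++ ['.'])).length = ss.length := by simp
    rw [cum_build (ss.map (fun s => s ++ ['.']))]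
    have hguard : PySem.List.pyGetD ((List.range ((ss.map (fun s => s ++ ['.'])).length + 1)).map (fun k => pvS (ss.map (fun s => s ++ ['.'])) k)) 1 0 = pvS (ss.map (fun s => s ++ ['.'])) 1 := by
      have h := cum_get (ss.map (fun s => s ++ ['.'])) (m := 1) (by omega) (by rw [hN]; exact_mod_cast hss1)
      simpa using h
    rw [hguard]
    have hlen : ((((List.range ((ss.map (fun s => s ++ ['.'])).length + 1)).map (fun k => pvS (ss.map (fun s => s ++ ['.'])) k)).length : Nat) : Int) - 1 = ((ss.map (fun s => s ++ ['.'])).length : Int) := by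
      simp
    rw [hlen]
    by_cases hg : pvS (ss.map (fun s => s ++ ['.'])) 1 ≤ t - 10
    · rw [if_pos hg]
      obtain ⟨r, hrun, hr1, hrN, hrle, hrstop⟩ :=
        pvBisect_spec (ss.map (fun s => s ++ ['.'])) (t - 10) ((ss.map (fun s => s ++ ['.'])).length)
          1 ((ss.map (fun s => s ++ ['.'])).length : Int)
          (by omega) (by omega) (by rw [hN]; exact_mod_cast hss1) le_rfl
          (by simpa using hg) (Or.inl rfl)
      rw [hrun]
      have hrN' : r ≤ ss.length := by rw [hN] at hrN; exact_mod_cast hrN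
      have hA : pvTruncLoopA t ss [] = ((ss.map (fun s => s ++ ['.'])).take r).flatten := by
        have h := truncA_spec t ss [] r (by omega) ?_ ?_
        · simpa using h
        · intro j hj
          have hmono := pvS_mono (ss.map (fun s => s ++ ['.'])) (i := j + 1) (j := r) (by omega)
          simp only [List.length_nil, Nat.cast_zero, zero_add]
          omega
        · simp only [List.length_nil, Nat.cast_zero, zero_add]
          rcases hrstop with h | h
          · left
            rw [hN] at h
            exact_mod_cast h
          · right; omega
      have hAne : pvTruncLoopA t ss [] ≠ [] := by
        rw [hA]
        cases ss with
        | nil => exact absurd rfl hne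
        | cons s0 rest =>
          cases r with
          | zero => omega
          | succ r' => simp
      rw [if_pos hAne, hA,
        PySem.List.slice_to ((ss.map (fun s => s ++ ['.']))) (by positivity : (0 : Int) ≤ ((r : Nat) : Int)),
        join_nil_flatten]
      simp
    · rw [if_neg hg]
      have hA0 : pvTruncLoopA t ss [] = [] := by
        have h := truncA_spec t ss [] 0 (by omega) (by intro j hj; omega) ?_
        · simpa using h
        · right
          simp only [List.length_nil, Nat.cast_zero, zero_add]
          exact hg
      rw [hA0]
      simp

-- ===== VERDICT (by name: the statement is the Claim_ definition above) =====
theorem generate_content_variations_by_length_spec : Claim_equal_generate_content_variations_by_length := by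
  intro base_content target_lengths _
  unfold Spec_generate_content_variations_by_length
  unfold generate_content_variations_by_length generate_content_variations_by_length_alt
  simp only []
  rw [foldlA_eq_map base_content target_lengths []]
  rw [foldlB_eq_map base_content target_lengths []]
  simp only [List.nil_append]
  exact List.map_congr_left (fun t _ => elem_eq base_content t)
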